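-- pv_equiv track=rewrite | github.com/lesc-ufv/fdam | fdam-hw-generator/src/make_arbiter_controller_rd_req_tree.py | make_arbiter_controller_tree_array
-- ===== SOURCE A (Python) =====
-- def make_arbiter_controller_tree_array(radix, num_input, array):
--     if radix < 2:
--         raise Exception("The radix parameter needs greater than 1, found: %d" % radix)
--     m_array = []
--     while num_input > radix:
--         m_array.append(radix)
--         num_input = num_input - radix
--     else:
--         m_array.append(num_input)
--
--     array.append(m_array)
--     if len(m_array) == 1:
--         return array
--     else:
--         return make_arbiter_controller_tree_array(radix, len(m_array), array)
-- ===== SOURCE B (Python) =====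
-- def make_arbiter_controller_tree_array(radix, num_input, array):
--     if radix < 2:
--         raise Exception("The radix parameter needs greater than 1, found: %d" % radix)
--     # phase 1: compute the size of every level first (ceil-division closed form)
--     sizes = [num_input]
--     while sizes[-1] > radix:
--         sizes.append((sizes[-1] - 1) // radix + 1)
--     # phase 2: turn each level size into its block list and append it to array
--     for n in sizes:
--         if n <= radix:
--             array.append([n])
--         else:
--             k = (n - 1) // radix
--             array.append([radix] * k + [n - k * radix])
--     return array
-- ===== Notes on version B (the rewrite author's own statement) =====
-- stated objective: alternative
-- what changed: A interleaves block building (by repeated subtraction) with tail recursion over levels; B is two staged passes: first compute the whole list of level sizes by a ceil-division closed form, then map each size to its block with one floor-division, so both A's recursion and its subtraction loop disappear.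
import Mathlib
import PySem

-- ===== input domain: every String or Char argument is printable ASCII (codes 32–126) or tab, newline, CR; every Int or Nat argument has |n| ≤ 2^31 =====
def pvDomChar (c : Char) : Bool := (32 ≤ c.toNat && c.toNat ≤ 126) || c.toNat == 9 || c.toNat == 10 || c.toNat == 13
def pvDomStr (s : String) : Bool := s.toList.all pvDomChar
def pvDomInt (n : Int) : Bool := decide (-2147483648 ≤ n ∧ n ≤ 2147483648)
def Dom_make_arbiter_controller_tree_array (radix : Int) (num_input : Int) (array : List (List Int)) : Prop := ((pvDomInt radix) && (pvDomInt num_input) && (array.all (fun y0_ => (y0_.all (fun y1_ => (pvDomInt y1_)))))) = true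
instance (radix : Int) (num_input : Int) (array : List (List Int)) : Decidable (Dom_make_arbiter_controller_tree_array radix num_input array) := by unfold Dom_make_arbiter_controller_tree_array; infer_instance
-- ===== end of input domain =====

-- B replaces A's level recursion interleaved with a repeated-subtraction block loop by two
-- staged passes: first compute every level's size by ceil division, then map each size to
-- its block list (same return value; in Python both A and B mutate the passed `array`).
-- Loops/recursion are ported on a Nat fuel that provably suffices when 2 ≤ radix.

-- ===== PORT A =====
-- A's inner `while num_input > radix` loop; fuel (n - radix).toNat bounds its iteration
-- count since each pass subtracts radix ≥ 2
def pvBlockA (radix : Int) (fuel : Nat) (n : Int) : List Int :=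
  match fuel with
  | 0 => [n]
  | fuel + 1 => if radix < n then radix :: pvBlockA radix fuel (n - radix) else [n]

-- A's recursive body; fuel n.toNat bounds the recursion depth since len(m_array) < num_input
def pvMakeA (radix : Int) (fuel : Nat) (n : Int) (array : List (List Int)) : List (List Int) :=
  if radix < 2 then array   -- Python raises here; excluded by Pre_
  else
    let m_array := pvBlockA radix (n - radix).toNat n
    let array' := array ++ [m_array]
    if m_array.length = 1 then array'
    else
      match fuel with
      | 0 => array'   -- unreachable when 2 ≤ radix (fuel suffices; proved below)
      | fuel + 1 => pvMakeA radix fuel (m_array.length : Int) array'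

def make_arbiter_controller_tree_array (radix : Int) (num_input : Int) (array : List (List Int)) : List (List Int) :=
  pvMakeA radix num_input.toNat num_input array

-- ===== PORT B =====
-- phase 1 of Source B: the list of level sizes, `while sizes[-1] > radix: append (last-1)//radix + 1`;
-- fuel n.toNat bounds its length since each size strictly decreases
def pvSizes (radix : Int) (fuel : Nat) (n : Int) : List Int :=
  match fuel with
  | 0 => [n]
  | fuel + 1 =>
      if radix < n then n :: pvSizes radix fuel (PySem.Int.floordiv (n - 1) radix + 1)
      else [n]

-- phase 2 of Source B: one size becomes one block, via a single floor division
def pvBlockB (radix n : Int) : List Int :=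
  if n ≤ radix then [n]
  else
    let k := PySem.Int.floordiv (n - 1) radix
    List.replicate k.toNat radix ++ [n - k * radix]

def make_arbiter_controller_tree_array_alt (radix : Int) (num_input : Int) (array : List (List Int)) : List (List Int) :=
  if radix < 2 then array   -- Python raises here; excluded by Pre_
  else array ++ (pvSizes radix num_input.toNat num_input).map (pvBlockB radix)

-- ===== PRECONDITION & SPEC =====
-- Pre_ excludes exactly radix < 2, where the Python A raises an Exception (B keeps the same raise).
def Pre_make_arbiter_controller_tree_array (radix : Int) (num_input : Int) (array : List (List Int)) : Prop := 2 ≤ radix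
instance (radix : Int) (num_input : Int) (array : List (List Int)) : Decidable (Pre_make_arbiter_controller_tree_array radix num_input array) := by unfold Pre_make_arbiter_controller_tree_array; infer_instance
def pvWitness_make_arbiter_controller_tree_array : Int × Int × List (List Int) := (2, 5, [])

def Spec_make_arbiter_controller_tree_array (radix : Int) (num_input : Int) (array : List (List Int)) (out : List (List Int)) : Prop := out = make_arbiter_controller_tree_array_alt radix num_input array
instance (radix : Int) (num_input : Int) (array : List (List Int)) (out : List (List Int)) : Decidable (Spec_make_arbiter_controller_tree_array radix num_input array out) := by unfold Spec_make_arbiter_controller_tree_array; infer_instance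

-- ===== CLAIM (what is proved, stated in full; the proofs are below) =====
def Claim_equal_make_arbiter_controller_tree_array : Prop := ∀ (radix : Int) (num_input : Int) (array : List (List Int)), Dom_make_arbiter_controller_tree_array radix num_input array → Pre_make_arbiter_controller_tree_array radix num_input array → Spec_make_arbiter_controller_tree_array radix num_input array (make_arbiter_controller_tree_array radix num_input array)

-- ===== LEMMAS AND PROOFS =====
theorem pvBlockB_base (radix n : Int) (h : n ≤ radix) : pvBlockB radix n = [n] := by
  simp only [pvBlockB, if_pos h]

-- B's one-division block satisfies A's peel-one-radix recurrence (pure arithmetic)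
theorem pvBlockB_step (radix n : Int) (h : 2 ≤ radix) (hn : radix < n) :
    pvBlockB radix n = radix :: pvBlockB radix (n - radix) := by
  have hpos : (0:Int) < radix := by omega
  have hfd : PySem.Int.floordiv (n - 1) radix = (n - 1) / radix :=
    PySem.Int.floordiv_eq_ediv_of_pos hpos
  have hsum : radix * ((n - 1) / radix) + (n - 1) % radix = n - 1 := Int.ediv_add_emod (n - 1) radix
  have hr0 : 0 ≤ (n - 1) % radix := Int.emod_nonneg (n - 1) (by omega)
  have hrlt : (n - 1) % radix < radix := Int.emod_lt_of_pos (n - 1) hpos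
  have hq1 : 1 ≤ (n - 1) / radix := by
    have h1 : (1:Int) * radix ≤ n - 1 := by omega
    exact (Int.le_ediv_iff_mul_le hpos).mpr h1
  by_cases h2 : n - radix ≤ radix
  · -- last peel: radix < n ≤ 2*radix, so k = 1
    have hq2 : (n - 1) / radix < 2 := by
      have h3 : n - 1 < 2 * radix := by omega
      exact (Int.ediv_lt_iff_lt_mul hpos).mpr h3
    have hk : (n - 1) / radix = 1 := by omega
    have hA : ¬ n ≤ radix := by omega
    rw [pvBlockB_base radix (n - radix) h2]
    simp only [pvBlockB, if_neg hA, hfd, hk]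
    norm_num
  · -- interior peel: k(n) = k(n - radix) + 1
    have hfd2 : PySem.Int.floordiv (n - radix - 1) radix = (n - radix - 1) / radix :=
      PySem.Int.floordiv_eq_ediv_of_pos hpos
    have hdiv : (n - radix - 1) / radix = (n - 1) / radix - 1 := by
      have := Int.add_mul_ediv_right (n - 1) (-1) (by omega : radix ≠ 0)
      simpa [sub_eq_add_neg, neg_one_mul, add_comm, add_left_comm, add_assoc] using this
    have hq2 : 2 ≤ (n - 1) / radix := by
      have h3 : (2:Int) * radix ≤ n - 1 := by omega
      exact (Int.le_ediv_iff_mul_le hpos).mpr h3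
    have htn : ((n - 1) / radix).toNat = ((n - 1) / radix - 1).toNat + 1 := by omega
    have hA : ¬ n ≤ radix := by omega
    have hB : ¬ n - radix ≤ radix := h2
    simp only [pvBlockB, if_neg hA, if_neg hB, hfd, hfd2, hdiv]
    rw [htn, List.replicate_succ, List.cons_append]
    have he : n - radix - ((n - 1) / radix - 1) * radix = n - (n - 1) / radix * radix := by ring
    rw [he]

-- with sufficient fuel, A's subtraction loop builds exactly Source B's block
theorem pvBlock_eq (radix : Int) (h : 2 ≤ radix) :
    ∀ (fuel : Nat) (n : Int), (n - radix).toNat ≤ fuel →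
    pvBlockA radix fuel n = pvBlockB radix n := by
  intro fuel
  induction fuel with
  | zero =>
    intro n hk
    rw [pvBlockA, pvBlockB_base radix n (by omega)]
  | succ fuel ih =>
    intro n hk
    by_cases hn : radix < n
    · rw [pvBlockA]
      simp only [if_pos hn]
      rw [ih (n - radix) (by omega), pvBlockB_step radix n h hn]
    · rw [pvBlockA]
      simp only [if_neg hn]
      rw [pvBlockB_base radix n (by omega)]

-- when radix < n, the block's length is the next level size, is ≥ 2, and is < n
theorem pvBlockB_length (radix n : Int) (h : 2 ≤ radix) (hn : radix < n) :
    ((pvBlockB radix n).length : Int) = PySem.Int.floordiv (n - 1) radix + 1 ∧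
    2 ≤ (pvBlockB radix n).length ∧ ((pvBlockB radix n).length : Int) < n := by
  have hpos : (0:Int) < radix := by omega
  have hfd : PySem.Int.floordiv (n - 1) radix = (n - 1) / radix :=
    PySem.Int.floordiv_eq_ediv_of_pos hpos
  have hq1 : 1 ≤ (n - 1) / radix := by
    have h1 : (1:Int) * radix ≤ n - 1 := by omega
    exact (Int.le_ediv_iff_mul_le hpos).mpr h1
  have hmul : radix * ((n - 1) / radix) ≤ n - 1 := by
    have hsum : radix * ((n - 1) / radix) + (n - 1) % radix = n - 1 := Int.ediv_add_emod (n - 1) radix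
    have hr0 : 0 ≤ (n - 1) % radix := Int.emod_nonneg (n - 1) (by omega)
    omega
  have h2k : 2 * ((n - 1) / radix) ≤ n - 1 := by nlinarith
  have hA : ¬ n ≤ radix := by omega
  simp only [pvBlockB, if_neg hA, hfd, List.length_append, List.length_replicate,
    List.length_cons, List.length_nil]
  push_cast
  omega

-- when the level size is ≤ radix, B's sizes list is a singleton whatever the fuel
theorem pvSizes_base (radix : Int) (fuel : Nat) (n : Int) (h : ¬ radix < n) :
    pvSizes radix fuel n = [n] := by
  cases fuel with
  | zero => rfl
  | succ fuel => simp only [pvSizes, if_neg h]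

-- A's interleaved recursion equals B's staged map over the precomputed sizes
theorem pvMain_aux (radix : Int) (h : 2 ≤ radix) :
    ∀ (fA : Nat), ∀ (fS : Nat) (n : Int) (array : List (List Int)),
    n.toNat ≤ fA → n.toNat ≤ fS →
    pvMakeA radix fA n array = array ++ (pvSizes radix fS n).map (pvBlockB radix) := by
  intro fA
  induction fA with
  | zero =>
    intro fS n array hA hB
    have hn : ¬ radix < n := by omega
    rw [pvMakeA.eq_def, if_neg (by omega : ¬ radix < 2), pvSizes_base radix fS n hn]
    rw [pvBlock_eq radix h _ n (by omega), pvBlockB_base radix n (by omega)]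
    simp [pvBlockB_base radix n (by omega)]
  | succ fA ih =>
    intro fS n array hA hB
    rw [pvMakeA.eq_def, if_neg (by omega : ¬ radix < 2)]
    rw [pvBlock_eq radix h _ n le_rfl]
    by_cases hn : radix < n
    · obtain ⟨hlen, hge2, hlt⟩ := pvBlockB_length radix n h hn
      have hne : ¬ (pvBlockB radix n).length = 1 := by omega
      simp only [if_neg hne]
      have hfS : ∃ fS', fS = fS' + 1 := by
        cases fS with
        | zero => exact absurd hB (by omega)
        | succ fS' => exact ⟨fS', rfl⟩
      obtain ⟨fS', rfl⟩ := hfS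
      rw [pvSizes]
      simp only [if_pos hn, List.map_cons]
      have hnext : PySem.Int.floordiv (n - 1) radix + 1 = ((pvBlockB radix n).length : Int) :=
        hlen.symm
      rw [hnext]
      rw [ih fS' ((pvBlockB radix n).length : Int) (array ++ [pvBlockB radix n])
        (by omega) (by omega)]
      simp
    · rw [pvSizes_base radix fS n hn, pvBlockB_base radix n (by omega)]
      simp [pvBlockB_base radix n (by omega)]

-- ===== VERDICT (by name: the statement is the Claim_ definition above) =====
theorem make_arbiter_controller_tree_array_spec : Claim_equal_make_arbiter_controller_tree_array := by
  intro radix num_input array _ hpre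
  unfold Spec_make_arbiter_controller_tree_array make_arbiter_controller_tree_array
    make_arbiter_controller_tree_array_alt
  rw [if_neg (not_lt.mpr hpre)]
  exact pvMain_aux radix hpre num_input.toNat num_input.toNat num_input array le_rfl le_rfl
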